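-- pv_equiv track=rewrite | github.com/auttij/Advent-of-Code | 2025/12/day.py | try_place
-- ===== SOURCE A (Python) =====
-- def try_place(board, shape, r, c):
--     rows, cols = len(board), len(board[0])
--     for y, row in enumerate(shape):
--         for x, val in enumerate(row):
--             if rows <= r + y or cols <= c + x:
--                 return False
--             if val == "#" and board[r + y][c + x]:
--                 return False
--     return True
-- ===== SOURCE B (Python) =====
-- def try_place(board, shape, r, c):
--     rows, cols = len(board), len(board[0])
--     # pass 1: closed-form bounds check per non-empty shape row
--     for y, row in enumerate(shape):
--         if row and (r + y >= rows or c + len(row) - 1 >= cols):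
--             return False
--     # pass 2: every '#' cell must land on a free board cell
--     return all(not board[r + y][c + x]
--                for y, row in enumerate(shape)
--                for x, val in enumerate(row)
--                if val == "#")
-- ===== Notes on version B (the rewrite author's own statement) =====
-- stated objective: alternative
-- what changed: Replaces A's single interleaved per-cell scan (bounds + collision checked at every cell) with two separate passes: a per-row closed-form bounds check using r+y and c+len(row)-1, then a per-cell collision pass over '#' cells only.
import Mathlib
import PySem

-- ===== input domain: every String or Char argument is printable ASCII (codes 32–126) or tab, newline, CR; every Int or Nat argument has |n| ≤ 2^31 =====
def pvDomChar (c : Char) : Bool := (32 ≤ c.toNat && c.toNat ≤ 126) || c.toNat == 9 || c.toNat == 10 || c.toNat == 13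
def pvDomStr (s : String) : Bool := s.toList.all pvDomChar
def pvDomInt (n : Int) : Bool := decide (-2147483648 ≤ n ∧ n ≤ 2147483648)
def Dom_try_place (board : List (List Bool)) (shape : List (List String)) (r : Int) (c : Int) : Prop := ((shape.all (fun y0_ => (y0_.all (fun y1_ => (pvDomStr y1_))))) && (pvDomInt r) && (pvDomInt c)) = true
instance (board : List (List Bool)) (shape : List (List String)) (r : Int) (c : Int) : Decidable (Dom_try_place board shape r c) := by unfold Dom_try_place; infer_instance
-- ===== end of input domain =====

-- B replaces A's single interleaved per-cell scan with two passes: a per-row closed-form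
-- bounds check, then a per-cell collision pass; alternative decomposition, same cost.


-- ===== PORT A =====
-- A's inner loop: per cell, bounds check then collision check, early return False.
def tryPlaceRowA (board : List (List Bool)) (rows cols ry c x : Int) : List String → Bool
  | [] => true
  | val :: rest =>
    if rows ≤ ry || cols ≤ c + x then false
    else if val == "#" && PySem.List.pyGetD (PySem.List.pyGetD board ry []) (c + x) false then false
    else tryPlaceRowA board rows cols ry c (x + 1) rest

-- A's outer loop over shape rows.
def tryPlaceShapeA (board : List (List Bool)) (rows cols r c y : Int) : List (List String) → Bool
  | [] => true
  | row :: rest =>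
    tryPlaceRowA board rows cols (r + y) c 0 row && tryPlaceShapeA board rows cols r c (y + 1) rest

def try_place (board : List (List Bool)) (shape : List (List String)) (r : Int) (c : Int) : Bool :=
  tryPlaceShapeA board (board.length : Int) ((PySem.List.pyGetD board 0 []).length : Int) r c 0 shape

-- ===== PORT B =====
-- B pass 1: per non-empty shape row, closed-form bounds check (r+y and c+len(row)-1).
def boundsPassB (rows cols r c y : Int) : List (List String) → Bool
  | [] => true
  | row :: rest =>
    if !row.isEmpty && (decide (r + y ≥ rows) || decide (c + (row.length : Int) - 1 ≥ cols)) then false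
    else boundsPassB rows cols r c (y + 1) rest

def try_place_alt (board : List (List Bool)) (shape : List (List String)) (r : Int) (c : Int) : Bool :=
  boundsPassB (board.length : Int) ((PySem.List.pyGetD board 0 []).length : Int) r c 0 shape
    -- pass 2: all(not board[r+y][c+x] for y,row ... for x,val ... if val == "#")
    && (PySem.List.enumerate shape 0).all (fun yrow =>
        ((PySem.List.enumerate yrow.2 0).filter (fun xval => xval.2 == "#")).all
          (fun xval => !(PySem.List.pyGetD (PySem.List.pyGetD board (r + yrow.1) []) (c + xval.1) false)))

-- ===== PRECONDITION & SPEC =====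
-- Helpers describing Python A's scan over the flattened shape cells (row-major order).
def pvCells_tp (shape : List (List String)) : List (Int × Int × String) :=
  (PySem.List.enumerate shape 0).flatMap
    (fun yrow => (PySem.List.enumerate yrow.2 0).map (fun xval => (yrow.1, xval.1, xval.2)))

-- the per-cell bounds guard A tests (r+y < rows and c+x < cols)
def pvGuard_tp (board : List (List Bool)) (r c y x : Int) : Bool :=
  decide (r + y < (board.length : Int)) && decide (c + x < ((PySem.List.pyGetD board 0 []).length : Int))

-- board[r+y][c+x] is a valid (possibly negative, Python-wrapped) access
def pvValid_tp (board : List (List Bool)) (r c y x : Int) : Bool :=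
  decide (PySem.Raise.InRange board.length (r + y)) &&
  decide (PySem.Raise.InRange (PySem.List.pyGetD board (r + y) []).length (c + x))

-- A's scan stops (returns False or raises) at this cell
def pvStop_tp (board : List (List Bool)) (r c : Int) (t : Int × Int × String) : Bool :=
  !pvGuard_tp board r c t.1 t.2.1 ||
  (t.2.2 == "#" && (!pvValid_tp board r c t.1 t.2.1 ||
     PySem.List.pyGetD (PySem.List.pyGetD board (r + t.1) []) (c + t.2.1) false))

-- A raises IndexError at this cell (guard passed, '#', but the board access is invalid)
def pvBad_tp (board : List (List Bool)) (r c : Int) (t : Int × Int × String) : Bool :=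
  pvGuard_tp board r c t.1 t.2.1 && t.2.2 == "#" && !pvValid_tp board r c t.1 t.2.1

-- Pre_ excludes exactly the inputs on which Python A raises IndexError: an empty board
-- (len(board[0]) raises), or a '#' cell whose board access is invalid and that A's scan
-- actually reaches (no earlier cell stops the scan with False).
def Pre_try_place (board : List (List Bool)) (shape : List (List String)) (r : Int) (c : Int) : Prop :=
  board ≠ [] ∧
  ∀ i < (pvCells_tp shape).length,
    pvBad_tp board r c ((pvCells_tp shape).getD i (0, 0, "")) = true →
      ∃ j < i, pvStop_tp board r c ((pvCells_tp shape).getD j (0, 0, "")) = true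
instance (board : List (List Bool)) (shape : List (List String)) (r : Int) (c : Int) : Decidable (Pre_try_place board shape r c) := by unfold Pre_try_place; infer_instance

def pvWitness_try_place : List (List Bool) × List (List String) × Int × Int := ([[false, true]], [["#", "."]], 0, 0)

def Spec_try_place (board : List (List Bool)) (shape : List (List String)) (r : Int) (c : Int) (out : Bool) : Prop := out = try_place_alt board shape r c
instance (board : List (List Bool)) (shape : List (List String)) (r : Int) (c : Int) (out : Bool) : Decidable (Spec_try_place board shape r c out) := by unfold Spec_try_place; infer_instance

-- ===== CLAIM (what is proved, stated in full; the proofs are below) =====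
def Claim_equal_try_place : Prop := ∀ (board : List (List Bool)) (shape : List (List String)) (r : Int) (c : Int), Dom_try_place board shape r c → Pre_try_place board shape r c → Spec_try_place board shape r c (try_place board shape r c)

-- ===== LEMMAS AND PROOFS =====

-- Closed-form bound status of a row whose first cell sits at column offset c + x.
def boundsRowOk (rows cols ry c x : Int) (row : List String) : Bool :=
  row.isEmpty || !(decide (rows ≤ ry) || decide (cols ≤ c + x + (row.length : Int) - 1))

-- Under an in-bounds first cell, prepending that cell does not change the closed-form bound.
theorem boundsRowOk_step (rows cols ry c x : Int) (val : String) (rest : List String)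
    (hr : ¬ rows ≤ ry) (hc : ¬ cols ≤ c + x) :
    boundsRowOk rows cols ry c x (val :: rest) = boundsRowOk rows cols ry c (x + 1) rest := by
  cases rest with
  | nil =>
    simp [boundsRowOk, hr]
    omega
  | cons b bs =>
    simp only [boundsRowOk, List.isEmpty_cons, List.length_cons, Bool.false_or]
    congr 2
    rw [decide_eq_decide]
    push_cast
    omega

-- A's interleaved row scan factors into the closed-form bound times B's '#'-cell pass.
theorem rowA_factor (board : List (List Bool)) (rows cols ry c : Int) (row : List String) :
    ∀ x : Int, tryPlaceRowA board rows cols ry c x row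
      = (boundsRowOk rows cols ry c x row &&
         ((PySem.List.enumerate row x).filter (fun xval => xval.2 == "#")).all
           (fun xval => !(PySem.List.pyGetD (PySem.List.pyGetD board ry []) (c + xval.1) false))) := by
  induction row with
  | nil => intro x; simp [tryPlaceRowA, boundsRowOk, PySem.List.enumerate_nil]
  | cons val rest ih =>
    intro x
    simp only [tryPlaceRowA, PySem.List.enumerate_cons, List.filter_cons]
    by_cases hr : rows ≤ ry
    · have hbf : boundsRowOk rows cols ry c x (val :: rest) = false := by
        simp [boundsRowOk, hr]
      simp [hr, hbf]
    · by_cases hc : cols ≤ c + x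
      · have hbf : boundsRowOk rows cols ry c x (val :: rest) = false := by
          simp [boundsRowOk]
          omega
        simp [hc, hbf]
      · have hnb : ¬ (rows ≤ ry || cols ≤ c + x) = true := by
          simp [hr, hc]
        rw [if_neg hnb]
        have hstep := boundsRowOk_step rows cols ry c x val rest hr hc
        by_cases hs : (val == "#") = true
        · by_cases hget : PySem.List.pyGetD (PySem.List.pyGetD board ry []) (c + x) false = true
          · simp [hs, hget]
          · simp only [Bool.not_eq_true] at hget
            rw [ih (x + 1), hstep]
            simp [hs, hget]
        · simp only [Bool.not_eq_true] at hs
          rw [ih (x + 1), hstep]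
          simp [hs]

-- A's full scan equals B's two passes, row by row.
theorem shapeA_factor (board : List (List Bool)) (rows cols r c : Int) (shape : List (List String)) :
    ∀ y : Int, tryPlaceShapeA board rows cols r c y shape
      = (boundsPassB rows cols r c y shape &&
         (PySem.List.enumerate shape y).all (fun yrow =>
           ((PySem.List.enumerate yrow.2 0).filter (fun xval => xval.2 == "#")).all
             (fun xval => !(PySem.List.pyGetD (PySem.List.pyGetD board (r + yrow.1) []) (c + xval.1) false)))) := by
  induction shape with
  | nil => intro y; simp [tryPlaceShapeA, boundsPassB, PySem.List.enumerate_nil]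
  | cons row rest ih =>
    intro y
    simp only [tryPlaceShapeA, boundsPassB, PySem.List.enumerate_cons, List.all_cons]
    rw [rowA_factor, ih (y + 1)]
    have hb : boundsRowOk rows cols (r + y) c 0 row
        = !(!row.isEmpty && (decide (r + y ≥ rows) || decide (c + (row.length : Int) - 1 ≥ cols))) := by
      cases row with
      | nil => simp [boundsRowOk]
      | cons s ss =>
        simp only [boundsRowOk, List.isEmpty_cons, Bool.false_or, Bool.not_false, Bool.true_and]
        congr 1
        congr 1
        all_goals rw [decide_eq_decide]
        all_goals (push_cast; omega)
    rw [hb]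
    cases hB : (!row.isEmpty && (decide (r + y ≥ rows) || decide (c + (row.length : Int) - 1 ≥ cols)))
    · simp only [Bool.not_false, Bool.true_and, Bool.false_eq_true, if_false]
      cases ((PySem.List.enumerate row 0).filter (fun xval => xval.2 == "#")).all
          (fun xval => !(PySem.List.pyGetD (PySem.List.pyGetD board (r + y) []) (c + xval.1) false)) <;>
        cases boundsPassB rows cols r c (y + 1) rest <;>
        cases (PySem.List.enumerate rest (y + 1)).all (fun yrow =>
           ((PySem.List.enumerate yrow.2 0).filter (fun xval => xval.2 == "#")).all
             (fun xval => !(PySem.List.pyGetD (PySem.List.pyGetD board (r + yrow.1) []) (c + xval.1) false))) <;>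
        simp_all
    · simp

-- ===== VERDICT (by name: the statement is the Claim_ definition above) =====
theorem try_place_spec : Claim_equal_try_place := by
  intro board shape r c _ _
  unfold Spec_try_place try_place try_place_alt
  exact shapeA_factor _ _ _ _ _ _ 0
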